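-- pv_equiv track=rewrite | github.com/repowise-dev/repowise | packages/server/src/repowise/server/mcp_server/tool_symbol.py | _name_variants
-- ===== SOURCE A (Python) =====
-- _NAME_SEPARATORS = (".", "::", "/")
--
-- def _name_variants(name: str) -> list[str]:
--     """Generate all separator variants of a qualified name segment.
--
--     Given "App.update_template_context" we yield the same name with every
--     supported separator between segments, so a DB storing "App::method"
--     still resolves when the agent passed dot-form (or vice versa).
--
--     Operates only on the *name* (post file-path), never on the path itself.
--     """
--     if not name:
--         return []
--     # Split on any of the known separators to get atomic segments.
--     segments = [name]
--     for sep in _NAME_SEPARATORS: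
--         next_segments: list[str] = []
--         for seg in segments:
--             next_segments.extend(seg.split(sep))
--         segments = next_segments
--     segments = [s for s in segments if s]
--     if not segments:
--         return [name]
--     variants: list[str] = []
--     seen: set[str] = set()
--     for sep in _NAME_SEPARATORS:
--         v = sep.join(segments)
--         if v not in seen:
--             seen.add(v)
--             variants.append(v)
--     # Also include the original as-is in case it used a mixed separator.
--     if name not in seen:
--         variants.append(name)
--     return variants
-- ===== SOURCE B (Python) =====
-- _NAME_SEPARATORS = (".", "::", "/")
--
-- def _name_variants(name: str) -> list[str]:
--     """Generate all separator variants of a qualified name segment.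
--
--     Single left-to-right scan tokenizer instead of A's three split passes;
--     dedup via a small ordered list instead of a parallel seen-set.
--     """
--     if not name:
--         return []
--     segments = []
--     buf = []
--     i = 0
--     n = len(name)
--     while i < n:
--         c = name[i]
--         if c == '.' or c == '/':
--             if buf:
--                 segments.append(''.join(buf))
--                 buf = []
--             i += 1
--         elif c == ':' and i + 1 < n and name[i + 1] == ':':
--             if buf:
--                 segments.append(''.join(buf))
--                 buf = []
--             i += 2
--         else:
--             buf.append(c)
--             i += 1
--     if buf:
--         segments.append(''.join(buf))
--     if not segments:
--         return [name]
--     variants = []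
--     for sep in _NAME_SEPARATORS:
--         v = sep.join(segments)
--         if v not in variants:
--             variants.append(v)
--     if name not in variants:
--         variants.append(name)
--     return variants
-- ===== Notes on version B (the rewrite author's own statement) =====
-- stated objective: alternative
-- what changed: Replaces A's three successive split passes over a growing segment list with one left-to-right character-scan tokenizer (greedy '::' lookahead), and dedups via the ordered variants list itself instead of a parallel seen-set.
import Mathlib
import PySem

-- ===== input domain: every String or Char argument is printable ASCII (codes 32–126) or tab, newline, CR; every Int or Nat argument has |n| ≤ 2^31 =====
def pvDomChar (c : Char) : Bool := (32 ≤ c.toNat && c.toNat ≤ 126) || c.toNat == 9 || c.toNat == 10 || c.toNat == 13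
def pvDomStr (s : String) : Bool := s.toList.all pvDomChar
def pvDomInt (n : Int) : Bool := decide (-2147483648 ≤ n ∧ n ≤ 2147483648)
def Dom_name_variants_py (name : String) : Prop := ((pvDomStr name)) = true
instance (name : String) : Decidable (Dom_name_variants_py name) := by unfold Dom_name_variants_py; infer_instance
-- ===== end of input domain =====

-- B replaces A's three split passes by a single left-to-right scan tokenizer and dedups
-- on the ordered output list itself (objective: alternative, same cost class in practice).

-- ===== PORT A =====
-- _NAME_SEPARATORS = (".", "::", "/")
def pvSeps : List String := [".", "::", "/"]

-- seg.split(sep): the separators here are non-empty literals, so Python's str.split(sep)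
-- is exactly PySem.Chars.splitOn on the code points (the some-case of PySem.Str.split?).
def pvSplit (s sep : String) : List String :=
  (PySem.Chars.splitOn s.toList sep.toList).map String.ofList

def name_variants_py (name : String) : List String :=
  if name = "" then []
  else
    let segments0 := pvSeps.foldl (fun segments sep =>
      segments.foldl (fun next seg => next ++ pvSplit seg sep) []) [name]
    let segments := segments0.filter (fun s => decide (s ≠ ""))
    if segments = [] then [name]
    else
      let p := pvSeps.foldl (fun (p : List String × PySem.Set String) sep =>
        let v := PySem.Str.join sep segments
        if PySem.Set.contains p.2 v then p else (p.1 ++ [v], PySem.Set.add p.2 v))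
        ([], PySem.Set.ofList [])
      if PySem.Set.contains p.2 name then p.1 else p.1 ++ [name]

-- ===== PORT B =====
-- Source B's while-loop over indices i with the '::' lookahead, as structural recursion on the
-- character list (buf is the accumulated current segment; ''.join(buf) = String.ofList buf).
-- The '::' lookahead is the pattern ':' :: ':' :: rest; the separator cases are disjoint,
-- so the pattern order matches Source B's if/elif chain.
def pvScan : List Char → List Char → List String
  | [], buf => if buf = [] then [] else [String.ofList buf]
  | ':' :: ':' :: rest, buf =>
      (if buf = [] then [] else [String.ofList buf]) ++ pvScan rest []
  | c :: rest, buf =>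
      if c = '.' || c = '/' then
        (if buf = [] then [] else [String.ofList buf]) ++ pvScan rest []
      else pvScan rest (buf ++ [c])

def name_variants_py_alt (name : String) : List String :=
  if name = "" then []
  else
    let segments := pvScan name.toList []
    if segments = [] then [name]
    else
      let variants := pvSeps.foldl (fun variants sep =>
        let v := PySem.Str.join sep segments
        if v ∈ variants then variants else variants ++ [v]) []
      if name ∈ variants then variants else variants ++ [name]

-- ===== PRECONDITION & SPEC =====
def Spec_name_variants_py (name : String) (out : List String) : Prop := out = name_variants_py_alt name
instance (name : String) (out : List String) : Decidable (Spec_name_variants_py name out) := by unfold Spec_name_variants_py; infer_instance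

-- ===== CLAIM (what is proved, stated in full; the proofs are below) =====
def Claim_equal_name_variants_py : Prop := ∀ (name : String), Dom_name_variants_py name → Spec_name_variants_py name (name_variants_py name)

-- ===== LEMMAS AND PROOFS =====

-- prepend a buffer to the head piece of a piece list
def consHead (b : List Char) : List (List Char) → List (List Char)
  | [] => [b]
  | h :: t => (b ++ h) :: t

-- structural model of str.split for a non-empty separator s0 :: srest
def msplit (s0 : Char) (srest : List Char) (cs : List Char) : List (List Char) :=
  match cs with
  | [] => [[]]
  | c :: r =>
    if (s0 :: srest).isPrefixOf (c :: r) then [] :: msplit s0 srest (r.drop srest.length)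
    else consHead [c] (msplit s0 srest r)
termination_by cs.length
decreasing_by
  · simp only [List.length_cons, List.length_drop]
    omega
  · simp

-- one-pass tokenizer (pieces including empties), greedy on '::'
def tok : List Char → List (List Char)
  | [] => [[]]
  | ':' :: ':' :: r => [] :: tok r
  | c :: r => if c = '.' || c = '/' then [] :: tok r else consHead [c] (tok r)

theorem consHead_consHead (b c : List Char) (l : List (List Char)) :
    consHead b (consHead c l) = consHead (b ++ c) l := by
  cases l <;> simp [consHead]

theorem consHead_append (b : List Char) (X Y : List (List Char)) (hX : X ≠ []) :
    consHead b (X ++ Y) = consHead b X ++ Y := by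
  cases X with
  | nil => simp at hX
  | cons h t => simp [consHead]

theorem consHead_nil_eq (X : List (List Char)) (hX : X ≠ []) : consHead [] X = X := by
  cases X with
  | nil => simp at hX
  | cons h t => simp [consHead]

theorem consHead_ne_nil (b : List Char) (X : List (List Char)) : consHead b X ≠ [] := by
  cases X <;> simp [consHead]

theorem msplit_ne_nil (s0 : Char) (srest cs : List Char) : msplit s0 srest cs ≠ [] := by
  cases cs with
  | nil => simp [msplit]
  | cons c r =>
    rw [msplit]
    split
    · simp
    · exact consHead_ne_nil _ _

theorem tok_ne_nil (cs : List Char) : tok cs ≠ [] := by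
  induction cs using tok.induct with
  | case1 => simp [tok]
  | case2 r ih => simp [tok]
  | case3 c r hne hc ih => rw [tok.eq_3 c r hne]; simp [hc]
  | case4 c r hne hc ih => rw [tok.eq_3 c r hne]; simp [hc]; exact consHead_ne_nil _ _

theorem flatMap_ne_nil (f : List Char → List (List Char)) (hf : ∀ p, f p ≠ [])
    (X : List (List Char)) (hX : X ≠ []) : X.flatMap f ≠ [] := by
  cases X with
  | nil => simp at hX
  | cons h t => simp [List.flatMap_cons]; intro h'; exact absurd h' (hf h)

theorem msplit_head_prefix (s0 : Char) (srest : List Char) :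
    ∀ cs, ∃ h t, msplit s0 srest cs = h :: t ∧ h <+: cs := by
  intro cs
  induction cs with
  | nil => exact ⟨[], [], by simp [msplit], by simp⟩
  | cons c r ih =>
    rw [msplit]
    split
    · exact ⟨[], _, rfl, List.nil_prefix⟩
    · obtain ⟨h, t, he, hp⟩ := ih
      rw [he]
      exact ⟨c :: h, t, by simp [consHead], List.cons_prefix_cons.mpr ⟨rfl, hp⟩⟩

theorem splitOn_go_spec (s0 : Char) (srest : List Char) :
    ∀ fuel l cur acc, l.length < fuel →
      PySem.Chars.splitOn.go (s0 :: srest) fuel l cur acc =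
        acc.reverse ++ consHead cur.reverse (msplit s0 srest l) := by
  intro fuel
  induction fuel with
  | zero => intro l cur acc h; omega
  | succ f ih =>
    intro l cur acc h
    cases l with
    | nil =>
      rw [PySem.Chars.splitOn.go]
      · simp [msplit, consHead]
      · omega
    | cons c r =>
      rw [PySem.Chars.splitOn.go.eq_def]
      simp only []
      rw [msplit]
      split
      · rename_i hpre
        rw [ih]
        · have hd : List.drop (s0 :: srest).length (c :: r) = r.drop srest.length := by
            simp [List.drop_succ_cons]
          rw [hd, List.reverse_nil, consHead_nil_eq _ (msplit_ne_nil s0 srest _)]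
          simp [consHead]
        · have := List.length_drop (i := (s0 :: srest).length) (l := (c :: r))
          simp only [List.length_cons] at *
          omega
      · rw [ih]
        · rw [consHead_consHead]
          simp
        · simp only [List.length_cons] at h
          omega

theorem splitOn_eq_msplit (s0 : Char) (srest cs : List Char) :
    PySem.Chars.splitOn cs (s0 :: srest) = msplit s0 srest cs := by
  rw [PySem.Chars.splitOn, splitOn_go_spec s0 srest (cs.length + 1) cs [] [] (by omega)]
  simp [consHead_nil_eq _ (msplit_ne_nil s0 srest cs)]

theorem flatMap_consHead_head (f : List Char → List (List Char)) (a : Char)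
    (h : List Char) (t : List (List Char)) (hf : ∀ p, f p ≠ [])
    (hcomm : f (a :: h) = consHead [a] (f h)) :
    ((a :: h) :: t).flatMap f = consHead [a] ((h :: t).flatMap f) := by
  simp only [List.flatMap_cons, hcomm]
  rw [consHead_append _ _ _ (hf h)]

theorem flat3_eq_tok (cs : List Char) :
    ((msplit '.' [] cs).flatMap (msplit ':' [':'])).flatMap (msplit '/' []) = tok cs := by
  induction cs using tok.induct with
  | case1 => simp [msplit, tok]
  | case2 r ih =>
    obtain ⟨h, t, he, -⟩ := msplit_head_prefix '.' [] r
    have m1 : msplit '.' [] (':' :: ':' :: r) = (':' :: ':' :: h) :: t := by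
      rw [msplit, msplit, he]
      simp [List.isPrefixOf, consHead]
    have f2h : msplit ':' [':'] (':' :: ':' :: h) = [] :: msplit ':' [':'] h := by
      rw [msplit]
      simp [List.isPrefixOf]
    rw [m1, List.flatMap_cons, f2h]
    rw [show tok (':' :: ':' :: r) = [] :: tok r by simp [tok]]
    rw [← ih, he]
    simp only [List.cons_append, List.flatMap_cons, List.flatMap_append]
    rw [show msplit '/' [] [] = [[]] by simp [msplit]]
    simp
  | case3 c r hne hc ih =>
    rw [tok.eq_3 c r hne]
    simp only [hc, if_pos]
    rcases Bool.or_eq_true_iff.mp hc with hdot | hslash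
    · have hcd : c = '.' := by simpa using hdot
      subst hcd
      have m1 : msplit '.' [] ('.' :: r) = [] :: msplit '.' [] r := by
        rw [msplit]; simp [List.isPrefixOf]
      rw [m1, List.flatMap_cons]
      rw [show msplit ':' [':'] [] = [[]] by simp [msplit]]
      simp only [List.cons_append, List.nil_append, List.flatMap_cons]
      rw [show msplit '/' [] [] = [[]] by simp [msplit]]
      simp only [List.cons_append, List.nil_append]
      rw [← ih]
    · have hcd : c = '/' := by simpa using hslash
      subst hcd
      have m1 : msplit '.' [] ('/' :: r) = consHead ['/'] (msplit '.' [] r) := by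
        rw [msplit]; simp [List.isPrefixOf, consHead]
      obtain ⟨h, t, he, -⟩ := msplit_head_prefix '.' [] r
      rw [m1, he]
      rw [show consHead ['/'] (h :: t) = ('/' :: h) :: t by simp [consHead]]
      rw [flatMap_consHead_head _ _ _ _ (fun p => msplit_ne_nil _ _ p)
        (by rw [msplit]; simp [List.isPrefixOf, consHead])]
      obtain ⟨h2, t2, he2⟩ :
          ∃ h2 t2, (h :: t).flatMap (msplit ':' [':']) = h2 :: t2 := by
        cases hx : (h :: t).flatMap (msplit ':' [':']) with
        | nil => exact absurd hx (flatMap_ne_nil _ (fun p => msplit_ne_nil _ _ p) _ (by simp))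
        | cons a b => exact ⟨a, b, rfl⟩
      rw [he2]
      rw [show consHead ['/'] (h2 :: t2) = ('/' :: h2) :: t2 by simp [consHead]]
      rw [List.flatMap_cons]
      rw [show msplit '/' [] ('/' :: h2) = [] :: msplit '/' [] h2 by
        rw [msplit]; simp [List.isPrefixOf]]
      simp only [List.cons_append]
      rw [← ih, he, he2]
      simp [List.flatMap_cons]
  | case4 c r hne hc ih =>
    rw [tok.eq_3 c r hne]
    simp only [hc]
    have hcdot : c ≠ '.' := by intro h; subst h; simp at hc
    have hcslash : c ≠ '/' := by intro h; subst h; simp at hc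
    have m1 : msplit '.' [] (c :: r) = consHead [c] (msplit '.' [] r) := by
      rw [msplit]; simp [List.isPrefixOf, Ne.symm hcdot]
    obtain ⟨h, t, he, hp⟩ := msplit_head_prefix '.' [] r
    have hch : ¬ (c = ':' ∧ ∃ h', h = ':' :: h') := by
      rintro ⟨hc1, h', hh'⟩
      obtain ⟨s, hs⟩ := hp
      rw [hh'] at hs
      exact hne _ hc1 (by rw [← hs]; rfl)
    have f2comm : msplit ':' [':'] (c :: h) = consHead [c] (msplit ':' [':'] h) := by
      rw [msplit]
      have hpre : ([':', ':'].isPrefixOf (c :: h)) = false := by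
        by_cases hc1 : c = ':'
        · subst hc1
          cases h with
          | nil => rfl
          | cons x h' =>
            have hx : x ≠ ':' := fun hh => hch ⟨rfl, h', by rw [hh]⟩
            simp only [List.isPrefixOf_cons₂]
            simp [List.isPrefixOf, Ne.symm hx]
        · simp only [List.isPrefixOf_cons₂]
          simp [Ne.symm hc1]
      simp [hpre]
    rw [m1, he]
    rw [show consHead [c] (h :: t) = (c :: h) :: t by simp [consHead]]
    rw [flatMap_consHead_head _ _ _ _ (fun p => msplit_ne_nil _ _ p) f2comm]
    obtain ⟨h2, t2, he2⟩ :
        ∃ h2 t2, (h :: t).flatMap (msplit ':' [':']) = h2 :: t2 := by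
      cases hx : (h :: t).flatMap (msplit ':' [':']) with
      | nil => exact absurd hx (flatMap_ne_nil _ (fun p => msplit_ne_nil _ _ p) _ (by simp))
      | cons a b => exact ⟨a, b, rfl⟩
    rw [he2]
    rw [show consHead [c] (h2 :: t2) = (c :: h2) :: t2 by simp [consHead]]
    rw [flatMap_consHead_head _ _ _ _ (fun p => msplit_ne_nil _ _ p)
      (by rw [msplit]; simp [List.isPrefixOf, Ne.symm hcslash, consHead])]
    rw [← ih, he, he2]
    simp

theorem pvScan_eq (cs buf : List Char) :
    pvScan cs buf = ((consHead buf (tok cs)).filter (fun p => p ≠ [])).map String.ofList := by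
  induction cs, buf using pvScan.induct with
  | case1 => simp [pvScan, tok, consHead]
  | case2 buf hbuf => simp [pvScan, tok, consHead, hbuf]
  | case3 rest buf ih =>
    rw [show pvScan (':' :: ':' :: rest) buf =
      (if buf = [] then [] else [String.ofList buf]) ++ pvScan rest [] from rfl]
    rw [ih, tok]
    rw [consHead_nil_eq _ (tok_ne_nil rest)]
    rw [show consHead buf ([] :: tok rest) = buf :: tok rest by simp [consHead]]
    by_cases hb : buf = [] <;> simp [hb]
  | case4 c rest buf hne hc ih =>
    rw [pvScan.eq_3 _ c rest hne]
    simp only [hc, if_pos]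
    rw [ih, tok.eq_3 c rest hne]
    simp only [hc, if_pos]
    rw [consHead_nil_eq _ (tok_ne_nil rest)]
    rw [show consHead buf ([] :: tok rest) = buf :: tok rest by simp [consHead]]
    by_cases hb : buf = [] <;> simp [hb]
  | case5 c rest buf hne hc ih =>
    rw [pvScan.eq_3 _ c rest hne]
    simp only [hc]
    rw [ih, tok.eq_3 c rest hne]
    simp [hc, consHead_consHead]

theorem dedup_inv (segs : List String) :
    ∀ (seps : List String) (l : List String) (s : PySem.Set String),
      (∀ x, x ∈ s ↔ x ∈ l) →
      (seps.foldl (fun p sep => let v := PySem.Str.join sep segs;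
          if PySem.Set.contains p.2 v then p else (p.1 ++ [v], PySem.Set.add p.2 v)) (l, s)).1
        = seps.foldl (fun variants sep => let v := PySem.Str.join sep segs;
            if v ∈ variants then variants else variants ++ [v]) l
      ∧ ∀ x, x ∈ (seps.foldl (fun p sep => let v := PySem.Str.join sep segs;
          if PySem.Set.contains p.2 v then p else (p.1 ++ [v], PySem.Set.add p.2 v)) (l, s)).2 ↔
          x ∈ seps.foldl (fun variants sep => let v := PySem.Str.join sep segs;
            if v ∈ variants then variants else variants ++ [v]) l := by
  intro seps
  induction seps with
  | nil => intro l s hinv; exact ⟨rfl, hinv⟩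
  | cons sep rest ih =>
    intro l s hinv
    simp only [List.foldl_cons]
    by_cases hv : PySem.Str.join sep segs ∈ l
    · have hcont : PySem.Set.contains s (PySem.Str.join sep segs) = true :=
        (PySem.Set.contains_iff _ _).mpr ((hinv _).mpr hv)
      simp only [hcont, if_pos, hv]
      exact ih l s hinv
    · have hcont : PySem.Set.contains s (PySem.Str.join sep segs) ≠ true := by
        intro h; exact hv ((hinv _).mp ((PySem.Set.contains_iff _ _).mp h))
      simp only [hcont, hv, if_false]
      exact ih (l ++ [PySem.Str.join sep segs]) (PySem.Set.add s _) (by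
        intro x
        rw [PySem.Set.mem_add]
        simp [hinv x])

theorem pvSplit_msplit (s : String) (s0 : Char) (srest : List Char) (sep : String)
    (hsep : sep.toList = s0 :: srest) :
    pvSplit s sep = (msplit s0 srest s.toList).map String.ofList := by
  unfold pvSplit
  rw [hsep, splitOn_eq_msplit]

theorem flatMap_pvSplit (L : List (List Char)) (s0 : Char) (srest : List Char) (sep : String)
    (hsep : sep.toList = s0 :: srest) :
    (L.map String.ofList).flatMap (fun seg => pvSplit seg sep)
      = (L.flatMap (msplit s0 srest)).map String.ofList := by
  simp only [List.flatMap_map]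
  rw [List.map_flatMap]
  congr 1
  funext p
  rw [pvSplit_msplit _ s0 srest sep hsep]
  simp

theorem filter_map_ofList (L : List (List Char)) :
    (L.map String.ofList).filter (fun s => decide (s ≠ ""))
      = (L.filter (fun p => decide (p ≠ []))).map String.ofList := by
  rw [List.filter_map]
  congr 1
  apply List.filter_congr
  intro p _
  simp

theorem segments_eq (name : String) :
    (pvSeps.foldl (fun segments sep =>
      segments.foldl (fun next seg => next ++ pvSplit seg sep) []) [name]).filter
        (fun s => decide (s ≠ ""))
      = pvScan name.toList [] := by
  rw [pvScan_eq, consHead_nil_eq _ (tok_ne_nil _), ← flat3_eq_tok]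
  simp only [pvSeps, List.foldl_cons, List.foldl_nil]
  simp only [PySem.List.foldl_append_eq_flatMap]
  simp only [List.nil_append]
  rw [pvSplit_msplit name '.' [] "." rfl]
  rw [flatMap_pvSplit _ ':' [':'] "::" rfl]
  rw [flatMap_pvSplit _ '/' [] "/" rfl]
  rw [filter_map_ofList]

-- ===== VERDICT (by name: the statement is the Claim_ definition above) =====
theorem name_variants_py_spec : Claim_equal_name_variants_py := by
  intro name _
  show name_variants_py name = name_variants_py_alt name
  rw [name_variants_py, name_variants_py_alt]
  by_cases hn : name = ""
  · rw [if_pos hn, if_pos hn]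
  · rw [if_neg hn, if_neg hn]
    simp only [segments_eq]
    by_cases hseg : pvScan name.toList [] = []
    · simp only [hseg, if_pos]
    · simp only [hseg, if_false]
      obtain ⟨h1, h2⟩ := dedup_inv (pvScan name.toList []) pvSeps [] (PySem.Set.ofList [])
        (by intro x; rw [PySem.Set.ofList_nil])
      by_cases hm : name ∈ List.foldl (fun variants sep =>
          let v := PySem.Str.join sep (pvScan name.toList []);
          if v ∈ variants then variants else variants ++ [v]) [] pvSeps
      · rw [if_pos ((PySem.Set.contains_iff _ _).mpr ((h2 name).mpr hm)), if_pos hm, h1]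
      · rw [if_neg (fun hct => hm ((h2 name).mp ((PySem.Set.contains_iff _ _).mp hct))),
          if_neg hm, h1]
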